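-- pv_equiv track=rewrite | github.com/gjenca/pycoherent | coherent.py | inverses
-- ===== SOURCE A (Python) =====
-- def inverses(colors):
--
--     ret={}
--     for i,color1 in enumerate(colors):
--         x,y=color1[0]
--         for j,color2 in enumerate(colors):
--             if (y,x) in color2:
--                 ret[i]=j
--                 break
--     return ret
-- ===== SOURCE B (Python) =====
-- def inverses(colors):
--     # Reverse pass with plain overwriting inserts: the smallest color index containing
--     # each pair is written last and wins; then one O(1) lookup per color.
--     first = {}
--     for j, color in reversed(list(enumerate(colors))):
--         for p in color:
--             first[p] = j
--     return {i: first[(color[0][1], color[0][0])]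
--             for i, color in enumerate(colors)
--             if (color[0][1], color[0][0]) in first}
-- ===== Notes on version B (the rewrite author's own statement) =====
-- stated objective: faster
-- what changed: B replaces A's inner scan over all colors for every color by a reversed overwrite pass that maps each pair to the smallest color index containing it, followed by a dict-comprehension of single lookups.
import Mathlib
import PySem

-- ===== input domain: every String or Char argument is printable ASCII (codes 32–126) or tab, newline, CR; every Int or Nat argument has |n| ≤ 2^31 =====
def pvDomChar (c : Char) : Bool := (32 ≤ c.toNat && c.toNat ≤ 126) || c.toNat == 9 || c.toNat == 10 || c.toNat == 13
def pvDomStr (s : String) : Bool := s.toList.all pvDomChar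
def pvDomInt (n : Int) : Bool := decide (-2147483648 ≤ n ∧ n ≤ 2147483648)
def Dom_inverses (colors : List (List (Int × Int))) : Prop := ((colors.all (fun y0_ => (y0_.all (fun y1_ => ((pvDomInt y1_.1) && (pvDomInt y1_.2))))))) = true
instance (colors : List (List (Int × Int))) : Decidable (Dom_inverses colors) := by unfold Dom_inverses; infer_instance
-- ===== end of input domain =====

-- B builds, in one reversed overwrite pass, a dict mapping each pair to the smallest color
-- index containing it, then does one lookup per color: O(n*m) instead of A's O(n^2*m).

-- ===== PORT A =====
-- inner loop of A: first j (from j upward) with (y,x) ∈ color2, else none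
def pvFindFirst (p : Int × Int) : List (List (Int × Int)) → Int → Option Int
  | [], _ => none
  | c :: rest, j => if c.contains p then some j else pvFindFirst p rest (j + 1)

-- outer loop of A over enumerate(colors); ret has fresh increasing keys, so it is built as a list
def pvOuterA (colors : List (List (Int × Int))) : List (List (Int × Int)) → Int → List (Int × Int)
  | [], _ => []
  | c :: rest, i =>
    match PySem.List.pyGet? c 0 with
    | some (x, y) =>
      match pvFindFirst (y, x) colors 0 with
      | some j => (i, j) :: pvOuterA colors rest (i + 1)
      | none => pvOuterA colors rest (i + 1)
    | none => pvOuterA colors rest (i + 1)   -- Python raises IndexError here; excluded by Pre_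

def inverses (colors : List (List (Int × Int))) : List (Int × Int) :=
  pvOuterA colors colors 0

-- ===== PORT B =====
-- 'for j, color in reversed(list(enumerate(colors))): for p in color: first[p] = j'
def pvFirst (colors : List (List (Int × Int))) : PySem.Dict (Int × Int) Int :=
  ((PySem.List.enumerate colors).reverse).foldl
    (fun d jc => jc.2.foldl (fun d p => d.insert p jc.1) d) PySem.Dict.empty

-- the dict comprehension: keys i are fresh and increasing, so it is built as a flatMap
def inverses_alt (colors : List (List (Int × Int))) : List (Int × Int) :=
  (PySem.List.enumerate colors).flatMap (fun ic =>
    match PySem.List.pyGet? ic.2 0 with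
    | some (x, y) =>
      match (pvFirst colors).get? (y, x) with
      | some j => [(ic.1, j)]
      | none => []
    | none => [])   -- Python raises IndexError here; excluded by Pre_

-- ===== PRECONDITION & SPEC =====
-- Pre_ excludes colors containing an empty color list, on which both Pythons raise IndexError at color[0].
def Pre_inverses (colors : List (List (Int × Int))) : Prop := ∀ c ∈ colors, c ≠ []
instance (colors : List (List (Int × Int))) : Decidable (Pre_inverses colors) := by unfold Pre_inverses; infer_instance
def pvWitness_inverses : (List (List (Int × Int))) := [[(1, 2)], [(2, 1), (3, 3)]]

def Spec_inverses (colors : List (List (Int × Int))) (out : List (Int × Int)) : Prop := out = inverses_alt colors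
instance (colors : List (List (Int × Int))) (out : List (Int × Int)) : Decidable (Spec_inverses colors out) := by unfold Spec_inverses; infer_instance

-- ===== CLAIM (what is proved, stated in full; the proofs are below) =====
def Claim_equal_inverses : Prop := ∀ (colors : List (List (Int × Int))), Dom_inverses colors → Pre_inverses colors → Spec_inverses colors (inverses colors)

-- ===== LEMMAS AND PROOFS =====

-- after inserting every pair of c with value j, lookup of p is j iff p ∈ c
lemma insert_all_get (c : List (Int × Int)) (d : PySem.Dict (Int × Int) Int) (j : Int)
    (p : Int × Int) :
    (c.foldl (fun d q => d.insert q j) d).get? p = if p ∈ c then some j else d.get? p := by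
  induction c generalizing d with
  | nil => simp
  | cons q c ih =>
    simp only [List.foldl_cons]
    rw [ih]
    by_cases hpq : p = q
    · subst hpq
      by_cases hc : p ∈ c <;> simp [hc, PySem.Dict.get?_insert_self]
    · simp [List.mem_cons, PySem.Dict.get?_insert, hpq]

-- the reversed overwrite fold, written as a foldr over the original (forward) order:
-- lookup of p is the FIRST index of l whose color contains p
lemma foldr_get (l : List (Int × List (Int × Int))) (d : PySem.Dict (Int × Int) Int)
    (p : Int × Int) :
    (l.foldr (fun jc d => jc.2.foldl (fun d q => d.insert q jc.1) d) d).get? p =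
      match l.find? (fun jc => jc.2.contains p) with
      | some jc => some jc.1
      | none => d.get? p := by
  induction l with
  | nil => simp
  | cons jc l ih =>
    simp only [List.foldr_cons, insert_all_get, ih, List.find?_cons]
    by_cases h : p ∈ jc.2 <;> simp [h]

-- find? over enumerate is A's inner scan
lemma find?_enumerate (p : Int × Int) (cs : List (List (Int × Int))) (i : Int) :
    (match (PySem.List.enumerate cs i).find? (fun jc => jc.2.contains p) with
      | some jc => some jc.1
      | none => (none : Option Int)) = pvFindFirst p cs i := by
  induction cs generalizing i with
  | nil => simp [PySem.List.enumerate_nil, pvFindFirst]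
  | cons c cs ih =>
    rw [PySem.List.enumerate_cons]
    simp only [List.find?_cons, pvFindFirst]
    by_cases h : p ∈ c
    · simp [h]
    · simpa [h] using ih (i + 1)

lemma pvFirst_get (colors : List (List (Int × Int))) (p : Int × Int) :
    (pvFirst colors).get? p = pvFindFirst p colors 0 := by
  unfold pvFirst
  rw [List.foldl_reverse, foldr_get]
  rw [← find?_enumerate p colors 0]
  cases (PySem.List.enumerate colors 0).find? (fun jc => jc.2.contains p) <;> simp

lemma outer_eq (colors : List (List (Int × Int))) (rest : List (List (Int × Int))) (i : Int) :
    (PySem.List.enumerate rest i).flatMap (fun ic =>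
      match PySem.List.pyGet? ic.2 0 with
      | some (x, y) =>
        match (pvFirst colors).get? (y, x) with
        | some j => [(ic.1, j)]
        | none => []
      | none => []) = pvOuterA colors rest i := by
  induction rest generalizing i with
  | nil => simp [PySem.List.enumerate_nil, pvOuterA]
  | cons c rest ih =>
    rw [PySem.List.enumerate_cons, List.flatMap_cons, ih]
    simp only [pvFirst_get, pvOuterA]
    cases h : PySem.List.pyGet? c 0 with
    | none => simp
    | some xy =>
      obtain ⟨x, y⟩ := xy
      rcases h' : pvFindFirst (y, x) colors 0 with _ | j <;> simp [h']

-- ===== VERDICT (by name: the statement is the Claim_ definition above) =====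
theorem inverses_spec : Claim_equal_inverses := by
  intro colors _ _
  unfold Spec_inverses inverses inverses_alt
  exact (outer_eq colors colors 0).symm
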